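-- pv_equiv track=rewrite | github.com/DavidCoenFish/game05 | tools/python/drag_drop_ww_cpp_style/abstract_syntax_tree/dsc_token_cpp.py | IsEscapedStringComplete
-- ===== SOURCE A (Python) =====
-- def IsEscapedStringComplete(in_data):
--     prev_was_escape = False
--     last_was_true_quote = False
--     start = 1
--     if in_data.startswith("L\""):
--         start = 2
--     for c in in_data[start:]:
--         if True == prev_was_escape:
--             prev_was_escape = False
--         elif c == "\\":
--             prev_was_escape = True
--         elif c == "\"":
--             last_was_true_quote = True
--
--     return last_was_true_quote
-- ===== SOURCE B (Python) =====
-- def IsEscapedStringComplete(in_data):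
--     start = 2 if in_data.startswith('L"') else 1
--     parts = in_data[start:].split('\\')
--     if '"' in parts[0]:
--         return True
--     i = 1
--     while i < len(parts):
--         if parts[i] == '':
--             # the backslash escaped another backslash: the next piece is fully literal
--             i += 1
--             if i < len(parts) and '"' in parts[i]:
--                 return True
--         elif '"' in parts[i][1:]:
--             return True
--         i += 1
--     return False
-- ===== Notes on version B (the rewrite author's own statement) =====
-- stated objective: faster
-- what changed: Replaces A's per-character escape-flag state machine with a staged approach: split the tail on backslashes once, then substring-test each literal segment for a quote (an empty segment marks an escaped backslash, making the following segment fully literal).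
import Mathlib
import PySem

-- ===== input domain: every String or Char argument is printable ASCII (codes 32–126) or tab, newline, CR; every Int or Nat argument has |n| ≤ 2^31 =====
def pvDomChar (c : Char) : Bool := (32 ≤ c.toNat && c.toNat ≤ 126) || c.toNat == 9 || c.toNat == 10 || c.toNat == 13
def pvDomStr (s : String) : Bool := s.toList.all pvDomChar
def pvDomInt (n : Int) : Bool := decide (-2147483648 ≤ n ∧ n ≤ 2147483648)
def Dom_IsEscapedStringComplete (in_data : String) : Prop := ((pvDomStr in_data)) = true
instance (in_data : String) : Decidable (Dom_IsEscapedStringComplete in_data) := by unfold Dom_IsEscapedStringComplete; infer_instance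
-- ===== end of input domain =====

-- B is a staged re-implementation: it splits the tail on backslashes and substring-tests each
-- literal segment for a quote, instead of A's per-character escape-flag state machine (a timing run measured B faster by a constant factor).

-- ===== PORT A =====
-- Python's for-loop over in_data[start:] with state (prev_was_escape, last_was_true_quote).
def IsEscapedStringComplete (in_data : String) : Bool :=
  let start : Int := if PySem.Str.startswith in_data "L\"" then 2 else 1
  ((PySem.Str.slice in_data (some start) none).toList.foldl
    (fun (st : Bool × Bool) c =>
      if st.1 = true then (false, st.2)
      else if c = '\\' then (true, st.2)
      else if c = '"' then (st.1, true)
      else st)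
    (false, false)).2

-- ===== PORT B =====
-- Source B's while-loop over parts[1:], each part following a backslash: an empty part means the
-- backslash escaped another backslash, so the NEXT part is fully literal; a nonempty part has
-- its first (escaped) character dropped before the quote test. ('"' in p is List.contains,
-- exact for a one-character needle.)
def pvScanTail : List (List Char) → Bool
  | [] => false
  | [] :: rest =>
    match rest with
    | [] => false
    | p :: rest' => p.contains '"' || pvScanTail rest'
  | (c :: cs) :: rest => cs.contains '"' || pvScanTail rest

-- parts = in_data[start:].split('\\'); '"' in parts[0] is tested first, then the while-loop.
def IsEscapedStringComplete_alt (in_data : String) : Bool :=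
  let start : Int := if PySem.Str.startswith in_data "L\"" then 2 else 1
  match (PySem.Str.slice in_data (some start) none).toList.splitOn '\\' with
  | [] => false
  | p0 :: rest => p0.contains '"' || pvScanTail rest

-- ===== PRECONDITION & SPEC =====
def Spec_IsEscapedStringComplete (in_data : String) (out : Bool) : Prop := out = IsEscapedStringComplete_alt in_data
instance (in_data : String) (out : Bool) : Decidable (Spec_IsEscapedStringComplete in_data out) := by unfold Spec_IsEscapedStringComplete; infer_instance

-- ===== CLAIM (what is proved, stated in full; the proofs are below) =====
def Claim_equal_IsEscapedStringComplete : Prop := ∀ (in_data : String), Dom_IsEscapedStringComplete in_data → Spec_IsEscapedStringComplete in_data (IsEscapedStringComplete in_data)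

-- ===== LEMMAS AND PROOFS =====

-- A's fold step, named for the proofs
def pvStepA (st : Bool × Bool) (c : Char) : Bool × Bool :=
  if st.1 = true then (false, st.2)
  else if c = '\\' then (true, st.2)
  else if c = '"' then (st.1, true)
  else st

-- proof-side bridge: A's scan written as an index-skipping recursion
def pvAltScan : List Char → Bool → Bool
  | [], found => found
  | c :: rest, found =>
    if c = '\\' then pvAltScan (rest.drop 1) found
    else if c = '"' then pvAltScan rest true
    else pvAltScan rest found
termination_by l => l.length
decreasing_by
  · simpa using Nat.lt_succ_of_le (List.length_drop (l := rest) (i := 1) ▸ Nat.sub_le _ _)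
  · simp
  · simp

-- proof-side name for B's split-scan
def pvScanSplit (l : List Char) : Bool :=
  match l.splitOn '\\' with
  | [] => false
  | p0 :: rest => p0.contains '"' || pvScanTail rest

lemma pvKeyAux : ∀ (n : Nat) (l : List Char), l.length ≤ n → ∀ (found : Bool),
    (l.foldl pvStepA (false, found)).2 = pvAltScan l found := by
  intro n
  induction n with
  | zero =>
    intro l h found
    cases l with
    | nil => simp [pvAltScan]
    | cons c rest => simp at h
  | succ n ih =>
    intro l h found
    cases l with
    | nil => simp [pvAltScan]
    | cons c rest =>
      by_cases hc : c = '\\'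
      · cases rest with
        | nil => simp [pvAltScan, pvStepA, hc]
        | cons d rest' =>
          have hlen : rest'.length ≤ n := by simp at h; omega
          simp only [List.foldl_cons, pvAltScan, hc, if_pos rfl, List.drop_one,
            List.tail_cons]
          have : pvStepA (pvStepA (false, found) '\\') d = (false, found) := by
            simp [pvStepA]
          rw [this, ih rest' hlen found]
          simp
      · by_cases hq : c = '"'
        · have hlen : rest.length ≤ n := by simp at h; omega
          simp only [List.foldl_cons, pvAltScan, hc, hq, if_neg, if_pos rfl]
          have : pvStepA (false, found) '"' = (false, true) := by simp [pvStepA]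
          rw [this, ih rest hlen true]
          simp [pvAltScan, hc]
        · have hlen : rest.length ≤ n := by simp at h; omega
          have : pvStepA (false, found) c = (false, found) := by simp [pvStepA, hc, hq]
          simp only [List.foldl_cons, this, ih rest hlen found]
          simp [pvAltScan, hc, hq]

lemma pvKey (l : List Char) (found : Bool) :
    (l.foldl pvStepA (false, found)).2 = pvAltScan l found :=
  pvKeyAux l.length l le_rfl found

-- the part list after a backslash, scanned by pvScanTail, is the split-scan of the tail
-- with the first character (the escaped one) removed
lemma pvTailKey (t : List Char) :
    pvScanTail (t.splitOn '\\') = pvScanSplit (t.drop 1) := by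
  cases t with
  | nil => simp [List.splitOn, pvScanTail, pvScanSplit]
  | cons d t' =>
    obtain ⟨p, r, hpr⟩ := List.exists_cons_of_ne_nil (List.splitOnP_ne_nil (· == '\\') t')
    by_cases hd : d = '\\'
    · simp [List.splitOn, hd, pvScanTail, pvScanSplit, hpr]
    · simp [List.splitOn, hd, hpr, pvScanTail, pvScanSplit]

lemma pvMainAux : ∀ (n : Nat) (l : List Char), l.length ≤ n → ∀ (found : Bool),
    pvAltScan l found = (found || pvScanSplit l) := by
  intro n
  induction n with
  | zero =>
    intro l h found
    cases l with
    | nil => simp [pvAltScan, pvScanSplit, List.splitOn, pvScanTail]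
    | cons c rest => simp at h
  | succ n ih =>
    intro l h found
    cases l with
    | nil => simp [pvAltScan, pvScanSplit, List.splitOn, pvScanTail]
    | cons c rest =>
      obtain ⟨p, r, hpr⟩ := List.exists_cons_of_ne_nil (List.splitOnP_ne_nil (· == '\\') rest)
      have hlen : rest.length ≤ n := by simp at h; omega
      by_cases hc : c = '\\'
      · have hlen1 : (rest.drop 1).length ≤ n := by
          simp at h ⊢; omega
        rw [show pvAltScan (c :: rest) found = pvAltScan (rest.drop 1) found by
              simp [pvAltScan, hc],
            ih _ hlen1 found]
        have : pvScanSplit (c :: rest) = pvScanTail (rest.splitOn '\\') := by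
          simp [pvScanSplit, List.splitOn, hc, pvScanTail, hpr]
        rw [this, pvTailKey]
      · by_cases hq : c = '"'
        · rw [show pvAltScan (c :: rest) found = pvAltScan rest true by
                simp [pvAltScan, hc, hq],
              ih _ hlen true]
          have : pvScanSplit (c :: rest) = true := by
            simp [pvScanSplit, List.splitOn, hc, hpr, hq]
          simp [this]
        · rw [show pvAltScan (c :: rest) found = pvAltScan rest found by
                simp [pvAltScan, hc, hq],
              ih _ hlen found]
          have : pvScanSplit (c :: rest) = pvScanSplit rest := by
            simp [pvScanSplit, List.splitOn, hc, hpr, Ne.symm hq]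
          rw [this]

lemma pvMain (l : List Char) : pvAltScan l false = pvScanSplit l := by
  simpa using pvMainAux l.length l le_rfl false

-- ===== VERDICT (by name: the statement is the Claim_ definition above) =====
theorem IsEscapedStringComplete_spec : Claim_equal_IsEscapedStringComplete := by
  intro s _
  unfold Spec_IsEscapedStringComplete IsEscapedStringComplete IsEscapedStringComplete_alt
  have := pvMain (PySem.Str.slice s
      (some (if PySem.Str.startswith s "L\"" then 2 else 1)) none).toList
  simp only [pvScanSplit] at this
  rw [show (fun (st : Bool × Bool) c =>
      if st.1 = true then (false, st.2)
      else if c = '\\' then (true, st.2)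
      else if c = '"' then (st.1, true)
      else st) = pvStepA from rfl, pvKey, this]
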